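-- pv_equiv track=rewrite | github.com/gitit4321/well_production_management | helpers.py | well_id_accumulator
-- ===== SOURCE A (Python) =====
-- def well_id_accumulator(db_data):
--     ids = {'well_ids': [], 'company_ids': [], 'basin_ids': [], 'formation_ids': []}
--
--     for d in db_data:
--         for k, v in d.items():
--             if k == 'well_id' and v not in ids['well_ids']:
--                 ids['well_ids'].append(v)
--             elif k == 'company_id' and v not in ids['company_ids']:
--                 ids['company_ids'].append(v)
--             elif k == 'basin_id' and v not in ids['basin_ids']:
--                 ids['basin_ids'].append(v)
--             elif k == 'formation_id' and v not in ids['formation_ids']: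
--                 ids['formation_ids'].append(v)
--
--     for lists in ids.values():
--         lists.sort()
--
--     return ids
-- ===== SOURCE B (Python) =====
-- def well_id_accumulator(db_data):
--     mapping = {'well_ids': 'well_id', 'company_ids': 'company_id',
--                'basin_ids': 'basin_id', 'formation_ids': 'formation_id'}
--     return {out: sorted({d[src] for d in db_data if src in d})
--             for out, src in mapping.items()}
-- ===== Notes on version B (the rewrite author's own statement) =====
-- stated objective: simpler
-- what changed: Replaces the single pass with an if/elif dispatch and 'v not in list' membership by a dict comprehension doing one independent scan per category with set dedup and sorted(); the mutable four-list accumulator disappears.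
import Mathlib
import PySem

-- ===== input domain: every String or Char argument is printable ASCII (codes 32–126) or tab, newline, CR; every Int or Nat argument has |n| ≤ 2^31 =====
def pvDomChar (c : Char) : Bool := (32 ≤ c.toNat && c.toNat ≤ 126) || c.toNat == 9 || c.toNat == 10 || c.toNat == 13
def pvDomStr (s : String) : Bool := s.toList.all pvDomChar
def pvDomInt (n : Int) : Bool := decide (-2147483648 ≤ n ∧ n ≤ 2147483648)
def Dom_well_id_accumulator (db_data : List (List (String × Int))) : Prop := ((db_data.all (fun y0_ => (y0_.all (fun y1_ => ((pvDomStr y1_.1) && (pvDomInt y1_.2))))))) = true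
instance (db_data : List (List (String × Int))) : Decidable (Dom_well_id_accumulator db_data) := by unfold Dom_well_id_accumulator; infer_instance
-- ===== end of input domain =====

-- B: one independent scan per category (first-match lookup per record, set dedup, sort)
-- instead of A's single pass with an if/elif dispatch into four growing lists. Same result.


-- ===== PORT A =====
-- the fixed-key dict 'ids' is represented by its four value lists, in key insertion order
def wiaStep (acc : List Int × List Int × List Int × List Int) (kv : String × Int) :
    List Int × List Int × List Int × List Int :=
  if kv.1 = "well_id" ∧ kv.2 ∉ acc.1 then (acc.1 ++ [kv.2], acc.2.1, acc.2.2.1, acc.2.2.2)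
  else if kv.1 = "company_id" ∧ kv.2 ∉ acc.2.1 then (acc.1, acc.2.1 ++ [kv.2], acc.2.2.1, acc.2.2.2)
  else if kv.1 = "basin_id" ∧ kv.2 ∉ acc.2.2.1 then (acc.1, acc.2.1, acc.2.2.1 ++ [kv.2], acc.2.2.2)
  else if kv.1 = "formation_id" ∧ kv.2 ∉ acc.2.2.2 then (acc.1, acc.2.1, acc.2.2.1, acc.2.2.2 ++ [kv.2])
  else acc

def well_id_accumulator (db_data : List (List (String × Int))) : List (String × List Int) :=
  let ids := db_data.foldl (fun acc d => d.foldl wiaStep acc) ([], [], [], [])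
  [("well_ids", PySem.List.sorted ids.1 (fun x => x) false),
   ("company_ids", PySem.List.sorted ids.2.1 (fun x => x) false),
   ("basin_ids", PySem.List.sorted ids.2.2.1 (fun x => x) false),
   ("formation_ids", PySem.List.sorted ids.2.2.2 (fun x => x) false)]

-- ===== PORT B =====
-- sorted({d[src] for d in db_data if src in d})
def wiaCollect (db_data : List (List (String × Int))) (src : String) : List Int :=
  PySem.List.sorted
    (PySem.Set.ofList (db_data.filterMap (fun d => (PySem.Dict.mk d).get? src)))
    (fun x => x) false

def well_id_accumulator_alt (db_data : List (List (String × Int))) : List (String × List Int) :=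
  [("well_ids", "well_id"), ("company_ids", "company_id"),
   ("basin_ids", "basin_id"), ("formation_ids", "formation_id")].map
    (fun p => (p.1, wiaCollect db_data p.2))

-- ===== PRECONDITION & SPEC =====
-- Pre_ excludes association lists with duplicate keys inside a record: A's Python argument is a
-- list of dicts, which cannot carry duplicate keys, so no Python input is excluded.
def Pre_well_id_accumulator (db_data : List (List (String × Int))) : Prop :=
  ∀ d ∈ db_data, (d.map Prod.fst).Nodup

instance (db_data : List (List (String × Int))) : Decidable (Pre_well_id_accumulator db_data) := by
  unfold Pre_well_id_accumulator; infer_instance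

def pvWitness_well_id_accumulator : (List (List (String × Int))) :=
  [[("well_id", 3), ("company_id", 2)], [("well_id", 1), ("basin_id", 5)], [("well_id", 3)]]

def Spec_well_id_accumulator (db_data : List (List (String × Int))) (out : List (String × List Int)) : Prop := out = well_id_accumulator_alt db_data
instance (db_data : List (List (String × Int))) (out : List (String × List Int)) : Decidable (Spec_well_id_accumulator db_data out) := by unfold Spec_well_id_accumulator; infer_instance

-- ===== CLAIM (what is proved, stated in full; the proofs are below) =====
def Claim_equal_well_id_accumulator : Prop := ∀ (db_data : List (List (String × Int))), Dom_well_id_accumulator db_data → Pre_well_id_accumulator db_data → Spec_well_id_accumulator db_data (well_id_accumulator db_data)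

-- ===== LEMMAS AND PROOFS =====

-- single-key accumulation step, proof-side only
def wiaG (s : String) (w : List Int) (d : List (String × Int)) : List Int :=
  d.foldl (fun w kv => if kv.1 = s ∧ kv.2 ∉ w then w ++ [kv.2] else w) w

-- projections of the four-list fold are independent single-key folds
theorem wiaStep_proj (d : List (String × Int)) (acc : List Int × List Int × List Int × List Int) :
    d.foldl wiaStep acc =
      (wiaG "well_id" acc.1 d, wiaG "company_id" acc.2.1 d,
       wiaG "basin_id" acc.2.2.1 d, wiaG "formation_id" acc.2.2.2 d) := by
  induction d generalizing acc with
  | nil => rfl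
  | cons kv rest ih =>
    obtain ⟨w, c, b, f⟩ := acc
    simp only [List.foldl_cons, wiaG, wiaStep]
    split_ifs with h1 h2 h3 h4 <;> simp_all [wiaG]

-- a key absent from d leaves wiaG fixed
theorem wiaG_of_not_mem (s : String) (w : List Int) (d : List (String × Int))
    (h : s ∉ d.map Prod.fst) : wiaG s w d = w := by
  induction d generalizing w with
  | nil => rfl
  | cons kv rest ih =>
    simp only [List.map_cons, List.mem_cons, not_or] at h
    simp [wiaG, List.foldl_cons, Ne.symm h.1]
    exact ih w h.2

-- under nodup keys, wiaG is a conditional Set.add of the first-match lookup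
theorem wiaG_eq_lookup (s : String) (w : List Int) (d : List (String × Int))
    (h : (d.map Prod.fst).Nodup) :
    wiaG s w d = match (PySem.Dict.mk d).get? s with
                 | some v => PySem.Set.add w v
                 | none => w := by
  induction d generalizing w with
  | nil => rfl
  | cons kv rest ih =>
    simp only [List.map_cons, List.nodup_cons] at h
    by_cases hk : kv.1 = s
    · have hrest : s ∉ rest.map Prod.fst := by rw [← hk]; exact h.1
      have step : wiaG s w (kv :: rest) =
          wiaG s (if kv.1 = s ∧ kv.2 ∉ w then w ++ [kv.2] else w) rest := rfl
      have hget : (PySem.Dict.mk (kv :: rest)).get? s = some kv.2 := by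
        rw [PySem.Dict.get?_mk_cons]; simp [hk]
      rw [step, wiaG_of_not_mem s _ rest hrest, hget]
      by_cases hv : kv.2 ∈ w
      · simp [hk, hv, PySem.Set.add, List.contains_eq_mem]
      · simp [hk, hv, PySem.Set.add, List.contains_eq_mem]
    · have : (PySem.Dict.mk (kv :: rest)).get? s = (PySem.Dict.mk rest).get? s := by
        rw [PySem.Dict.get?_mk_cons]; simp [hk]
      rw [this]
      simp only [wiaG, List.foldl_cons, hk, false_and, if_false]
      exact ih w h.2

-- the whole db fold, one component
theorem wia_fold_component (s : String) (db : List (List (String × Int))) (w : List Int)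
    (hpre : ∀ d ∈ db, (d.map Prod.fst).Nodup) :
    db.foldl (fun w d => wiaG s w d) w =
      (db.filterMap (fun d => (PySem.Dict.mk d).get? s)).foldl PySem.Set.add w := by
  induction db generalizing w with
  | nil => rfl
  | cons d rest ih =>
    simp only [List.foldl_cons, List.filterMap_cons]
    rw [wiaG_eq_lookup s w d (hpre d (by simp))]
    cases hg : (PySem.Dict.mk d).get? s with
    | none => simpa using ih _ (fun d hd => hpre d (by simp [hd]))
    | some v => simpa using ih _ (fun d hd => hpre d (by simp [hd]))

theorem wia_component_eq (s : String) (db : List (List (String × Int)))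
    (hpre : ∀ d ∈ db, (d.map Prod.fst).Nodup) :
    db.foldl (fun w d => wiaG s w d) [] =
      PySem.Set.ofList (db.filterMap (fun d => (PySem.Dict.mk d).get? s)) := by
  rw [wia_fold_component s db [] hpre, PySem.Set.ofList_eq_foldl]

theorem wia_fold_proj (db : List (List (String × Int)))
    (acc : List Int × List Int × List Int × List Int) :
    db.foldl (fun acc d => d.foldl wiaStep acc) acc =
      (db.foldl (fun w d => wiaG "well_id" w d) acc.1,
       db.foldl (fun w d => wiaG "company_id" w d) acc.2.1,
       db.foldl (fun w d => wiaG "basin_id" w d) acc.2.2.1,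
       db.foldl (fun w d => wiaG "formation_id" w d) acc.2.2.2) := by
  induction db generalizing acc with
  | nil => rfl
  | cons d rest ih =>
    simp only [List.foldl_cons, wiaStep_proj d acc]
    exact ih _

-- ===== VERDICT (by name: the statement is the Claim_ definition above) =====
theorem well_id_accumulator_spec : Claim_equal_well_id_accumulator := by
  intro db _ hpre
  unfold Spec_well_id_accumulator well_id_accumulator well_id_accumulator_alt wiaCollect
  rw [wia_fold_proj]
  simp only [wia_component_eq _ db hpre, List.map_cons, List.map_nil]
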